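-- pv_equiv track=rewrite | github.com/Pedro-V/cms-algorithms | ch07-09/ch07.py | pick_resume
-- ===== SOURCE A (Python) =====
-- def pick_resume(resumes):
--     eliminate = "top"
--     while len(resumes) > 1:
--         if eliminate == "top":
--             resumes = resumes[len(resumes) // 2:]
--             eliminate = "bottom"
--         else:
--             resumes = resumes[:len(resumes) // 2]
--             eliminate = "top"
--
--     return resumes[0]
-- ===== SOURCE B (Python) =====
-- def pick_resume(resumes):
--     # The survivor's index depends only on len(resumes): eliminating the bottom
--     # half of a segment of length m keeps its first m//2 elements, so a "drop top,
--     # then drop bottom" double round on length n adds n//2 to the survivor's index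
--     # and leaves a segment of length ((n - n//2)//2) == (n+1)//4.  Iterate that
--     # single recurrence and index the original list once.
--     idx, n = 0, len(resumes)
--     while n > 1:
--         idx += n // 2
--         n = (n + 1) // 4
--     return resumes[idx]
-- ===== Notes on version B (the rewrite author's own statement) =====
-- stated objective: alternative
-- what changed: B never touches the list in the loop: it computes the survivor's index purely arithmetically with the single recurrence idx += n//2; n = (n+1)//4 (one double elimination round per step, no alternating flag, no slicing), then indexes the original list once.
import Mathlib
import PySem

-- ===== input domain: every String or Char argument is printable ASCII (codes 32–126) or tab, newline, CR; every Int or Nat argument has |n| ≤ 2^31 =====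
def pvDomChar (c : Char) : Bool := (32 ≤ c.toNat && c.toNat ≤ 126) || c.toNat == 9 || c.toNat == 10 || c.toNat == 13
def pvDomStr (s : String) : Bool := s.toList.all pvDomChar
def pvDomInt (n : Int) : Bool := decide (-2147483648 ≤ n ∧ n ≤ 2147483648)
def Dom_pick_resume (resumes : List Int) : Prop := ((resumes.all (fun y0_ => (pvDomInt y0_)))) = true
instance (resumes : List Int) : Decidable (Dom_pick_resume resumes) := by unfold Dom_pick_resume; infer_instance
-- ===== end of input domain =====

-- B computes the survivor's index by a single arithmetic recurrence on the length
-- (idx += n//2; n = (n+1)//4, one double elimination round per step) and indexes once;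
-- no slicing, no alternating flag.

-- ===== PORT A =====
-- A's while loop, as structural recursion on a fuel counter; fuel = initial length is enough
-- since the list strictly shrinks each iteration (proved in pickLoopA_eq below).
def pickLoopA : Nat → List Int → String → List Int
  | 0, resumes, _ => resumes
  | fuel + 1, resumes, eliminate =>
    if resumes.length > 1 then
      if eliminate == "top" then
        pickLoopA fuel (PySem.List.slice resumes (some (PySem.Int.floordiv (resumes.length : Int) 2)) none) "bottom"
      else
        pickLoopA fuel (PySem.List.slice resumes none (some (PySem.Int.floordiv (resumes.length : Int) 2))) "top"
    else resumes

def pick_resume (resumes : List Int) : Int :=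
  (PySem.List.pyGet? (pickLoopA resumes.length resumes "top") 0).getD 0

-- ===== PORT B =====
-- B's while loop, same fuel pattern (fuel = initial n suffices: n strictly drops each step).
def pickLoopB : Nat → Nat → Nat → Nat
  | 0, idx, _ => idx
  | fuel + 1, idx, n =>
    if n > 1 then pickLoopB fuel (idx + n / 2) ((n + 1) / 4) else idx

def pick_resume_alt (resumes : List Int) : Int :=
  (PySem.List.pyGet? resumes ((pickLoopB resumes.length 0 resumes.length : Nat) : Int)).getD 0

-- ===== PRECONDITION & SPEC =====
-- Pre_ excludes the empty list, on which both Pythons raise IndexError.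
def Pre_pick_resume (resumes : List Int) : Prop := resumes ≠ []
instance (resumes : List Int) : Decidable (Pre_pick_resume resumes) := by unfold Pre_pick_resume; infer_instance
def pvWitness_pick_resume : List Int := [3, 1, 4, 1, 5]
def Spec_pick_resume (resumes : List Int) (out : Int) : Prop := out = pick_resume_alt resumes
instance (resumes : List Int) (out : Int) : Decidable (Spec_pick_resume resumes out) := by unfold Spec_pick_resume; infer_instance

-- ===== CLAIM (what is proved, stated in full; the proofs are below) =====
def Claim_equal_pick_resume : Prop := ∀ (resumes : List Int), Dom_pick_resume resumes → Pre_pick_resume resumes → Spec_pick_resume resumes (pick_resume resumes)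

-- ===== LEMMAS AND PROOFS =====

-- the survivor index, by well-founded recursion on the segment length (B's recurrence)
def survF (n : Nat) : Nat :=
  if 1 < n then n / 2 + survF ((n + 1) / 4) else 0
decreasing_by omega

-- A's survivor index as a function of segment length and current flag (fuel pattern of pickLoopA)
def idxF : Nat → Nat → Bool → Nat
  | 0, _, _ => 0
  | fuel + 1, n, flag =>
    if n > 1 then
      if flag then n / 2 + idxF fuel (n - n / 2) false else idxF fuel (n / 2) true
    else 0

-- survF for the "eliminate bottom" phase
def survG (n : Nat) : Nat := if 1 < n then survF (n / 2) else 0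

theorem survF_pos (n : Nat) (h : 1 < n) : survF n = n / 2 + survF ((n + 1) / 4) := by
  rw [survF]; simp only [if_pos h]

theorem survF_le1 (n : Nat) (h : ¬ 1 < n) : survF n = 0 := by
  rw [survF]; simp only [if_neg h]

theorem sliceA_drop (xs : List Int) :
    PySem.List.slice xs (some (PySem.Int.floordiv (xs.length : Int) 2)) none = xs.drop (xs.length / 2) := by
  have h : PySem.Int.floordiv (xs.length : Int) 2 = ((xs.length / 2 : Nat) : Int) := by
    exact_mod_cast PySem.Int.floordiv_natCast xs.length 2
  rw [h, PySem.List.slice_from_natCast]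

theorem sliceA_take (xs : List Int) :
    PySem.List.slice xs none (some (PySem.Int.floordiv (xs.length : Int) 2)) = xs.take (xs.length / 2) := by
  have h : PySem.Int.floordiv (xs.length : Int) 2 = ((xs.length / 2 : Nat) : Int) := by
    exact_mod_cast PySem.Int.floordiv_natCast xs.length 2
  rw [h, PySem.List.slice_to_natCast]

theorem idxF_lt (fuel : Nat) : ∀ (n : Nat) (flag : Bool), 1 ≤ n → n ≤ fuel → idxF fuel n flag < n := by
  induction fuel with
  | zero => intro n flag h1 h2; omega
  | succ f ih =>
    intro n flag h1 _h2
    unfold idxF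
    split
    · split
      · have := ih (n - n / 2) false (by omega) (by omega); omega
      · have := ih (n / 2) true (by omega) (by omega); omega
    · omega

-- A's index function, with enough fuel, is B's recurrence (survF / survG)
theorem idxF_eq_surv (fuel : Nat) : ∀ (n : Nat) (flag : Bool), n ≤ fuel →
    idxF fuel n flag = if flag then survF n else survG n := by
  induction fuel with
  | zero =>
    intro n flag hle
    have hn : n = 0 := by omega
    subst hn
    simp [idxF, survF, survG]
  | succ f ih =>
    intro n flag hle
    unfold idxF
    split
    · rename_i hgt
      cases flag with
      | true =>
        rw [ih (n - n / 2) false (by omega)]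
        simp only [reduceIte]
        rw [survF_pos n hgt]
        congr 1
        unfold survG
        rw [if_neg (show ¬ ((false : Bool) = true) by simp)]
        by_cases h2 : 1 < n - n / 2
        · rw [if_pos h2]
          congr 1
          omega
        · have hn2 : n = 2 := by omega
          subst hn2
          have h0 : survF ((2 + 1) / 4) = 0 := survF_le1 0 (by omega)
          simp [h0]
      | false =>
        rw [ih (n / 2) true (by omega)]
        simp [survG, hgt]
    · rename_i hle2
      cases flag with
      | true =>
        rw [survF_le1 n (by omega)]
        simp
      | false =>
        unfold survG
        simp [if_neg (by omega : ¬ 1 < n)]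

theorem pickLoopB_eq (fuel : Nat) : ∀ (idx n : Nat), n ≤ fuel →
    pickLoopB fuel idx n = idx + survF n := by
  induction fuel with
  | zero =>
    intro idx n hle
    have hn : n = 0 := by omega
    subst hn
    rw [survF_le1 0 (by omega)]
    simp [pickLoopB]
  | succ f ih =>
    intro idx n hle
    unfold pickLoopB
    split
    · rename_i hgt
      rw [ih (idx + n / 2) ((n + 1) / 4) (by omega), survF_pos n hgt]
      omega
    · rename_i hgt
      rw [survF_le1 n (by omega)]
      omega

theorem pickLoopA_eq (fuel : Nat) : ∀ (xs : List Int) (e : String), xs ≠ [] → xs.length ≤ fuel →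
    pickLoopA fuel xs e = [xs.getD (idxF fuel xs.length (e == "top")) 0] := by
  induction fuel with
  | zero =>
    intro xs e hne hle
    match xs, hne with
    | x :: rest, _ => simp at hle
  | succ f ih =>
    intro xs e hne hle
    unfold pickLoopA idxF
    split
    · rename_i hgt
      split
      · rename_i htop
        rw [sliceA_drop,
          ih _ "bottom"
            (by intro hc; have := congrArg List.length hc
                simp only [List.length_drop, List.length_nil] at this; omega)
            (by simp only [List.length_drop]; omega)]
        have hb : ("bottom" == "top") = false := by decide
        simp only [hb, List.length_drop]
        congr 1
        simp only [List.getD_eq_getElem?_getD, List.getElem?_drop]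
      · rw [sliceA_take,
          ih _ "top"
            (by intro hc; have := congrArg List.length hc
                simp only [List.length_take, List.length_nil] at this; omega)
            (by simp only [List.length_take]; omega)]
        have hb : ("top" == "top") = true := by decide
        simp only [hb, List.length_take]
        have hmin : min (xs.length / 2) xs.length = xs.length / 2 := by omega
        rw [hmin]
        congr 1
        have hlt : idxF f (xs.length / 2) true < xs.length / 2 :=
          idxF_lt f _ _ (by omega) (by omega)
        simp only [List.getD_eq_getElem?_getD]
        rw [List.getElem?_take_of_lt hlt]
    · rename_i hle2
      match xs, hne with
      | [x], _ => simp
      | (x :: y :: rest), _ => simp at hle2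

-- ===== VERDICT (by name: the statement is the Claim_ definition above) =====
theorem pick_resume_spec : Claim_equal_pick_resume := by
  intro xs _hdom hne
  unfold Spec_pick_resume pick_resume pick_resume_alt
  rw [pickLoopA_eq xs.length xs "top" hne (by omega),
    pickLoopB_eq xs.length 0 xs.length (by omega),
    idxF_eq_surv xs.length xs.length ("top" == "top") (by omega)]
  have htop : ("top" == "top") = true := by decide
  simp only [htop, if_true, Nat.zero_add, PySem.List.pyGet?_zero_cons,
    PySem.List.pyGet?_natCast, Option.getD_some, List.getD_eq_getElem?_getD]
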